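-- pv_equiv track=rewrite | github.com/n0mad1k/isaac | backend/services/auto_watering.py | parse_sprinkler_schedule
-- ===== SOURCE A (Python) =====
-- from typing import Dict, Optional, List, Tuple
--
-- def parse_sprinkler_schedule(schedule: str) -> Tuple[List[int], Optional[str]]:
--     """
--     Parse sprinkler schedule string.
--     Format: "days:0,1,3,5;time:06:00" (Mon=0, Tue=1, etc. at 6am)
--
--     Returns: (list of day numbers, time string or None)
--     """
--     if not schedule:
--         return [], None
--
--     days = []
--     time_str = None
--
--     for part in schedule.split(";"):
--         if part.startswith("days:"):
--             day_nums = part.replace("days:", "").split(",")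
--             days = [int(d.strip()) for d in day_nums if d.strip().isdigit()]
--         elif part.startswith("time:"):
--             time_str = part.replace("time:", "").strip()
--
--     return days, time_str
-- ===== SOURCE B (Python) =====
-- def parse_sprinkler_schedule(schedule):
--     """Index every 'key:value' part into a dict (last wins), then read the
--     'days' and 'time' entries from the mapping."""
--     mapping = {}
--     for part in schedule.split(";"):
--         i = part.find(":")
--         if i != -1:
--             mapping[part[:i]] = part[i + 1:]
--     if "days" in mapping:
--         days = [int(t.strip()) for t in mapping["days"].split(",")
--                 if t.strip().isdigit()]
--     else:
--         days = []
--     time_str = mapping["time"].strip() if "time" in mapping else None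
--     return days, time_str
-- ===== Notes on version B (the rewrite author's own statement) =====
-- stated objective: alternative
-- what changed: B builds a generic key->value mapping by splitting every part at its first colon (dict, last wins) and then derives days/time by two lookups, instead of A's fold that tests each part for the two literal prefixes and parses it immediately into accumulator state.
-- outside the precondition, e.g. on parse_sprinkler_schedule('days:1,days:2'): A returns ([1, 2], None), B returns ([1], None); on parse_sprinkler_schedule('time:a time:b'): A returns ([], 'a b'), B returns ([], 'a time:b')
import Mathlib
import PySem

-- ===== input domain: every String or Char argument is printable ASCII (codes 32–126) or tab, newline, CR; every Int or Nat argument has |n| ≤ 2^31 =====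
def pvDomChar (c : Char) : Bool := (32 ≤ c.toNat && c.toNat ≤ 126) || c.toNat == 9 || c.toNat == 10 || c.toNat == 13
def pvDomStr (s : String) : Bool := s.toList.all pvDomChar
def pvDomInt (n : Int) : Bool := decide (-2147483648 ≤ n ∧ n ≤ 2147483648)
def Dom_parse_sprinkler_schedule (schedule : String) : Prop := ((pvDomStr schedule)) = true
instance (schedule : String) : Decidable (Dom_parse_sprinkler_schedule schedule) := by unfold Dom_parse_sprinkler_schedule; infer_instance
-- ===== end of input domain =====

-- B first indexes every "key:value" part into a dict keyed by the text before the first colon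
-- (last wins), then reads "days"/"time" out of the mapping — instead of A's fold that pattern-matches
-- and parses each matching part as it is encountered (objective: alternative decomposition).


-- ===== PORT A =====
-- [int(d.strip()) for d in part.replace("days:","").split(",") if d.strip().isdigit()]
-- (the guard guarantees int() succeeds, so the .getD 0 default is never used)
def pvA_daysOf (part : String) : List Int :=
  (((PySem.Str.split? (PySem.Str.replace part "days:" "") ",").getD []).filter
      (fun d => PySem.Str.strIsdigit (PySem.Str.strip d))).map
    (fun d => (PySem.Int.ofStr? (PySem.Str.strip d)).getD 0)

def pvA_timeOf (part : String) : String :=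
  PySem.Str.strip (PySem.Str.replace part "time:" "")

def pvA_step (st : List Int × Option String) (part : String) : List Int × Option String :=
  if PySem.Str.startswith part "days:" then (pvA_daysOf part, st.2)
  else if PySem.Str.startswith part "time:" then (st.1, some (pvA_timeOf part))
  else st

def parse_sprinkler_schedule (schedule : String) : List Int × Option String :=
  if schedule = "" then ([], none)
  else ((PySem.Str.split? schedule ";").getD []).foldl pvA_step ([], none)

-- ===== PORT B =====
-- i = part.find(":"); if i != -1: mapping[part[:i]] = part[i+1:]
def pvB_kv? (part : String) : Option (String × String) :=
  let i := PySem.Str.find part ":"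
  if i = -1 then none
  else some (PySem.Str.slice part none (some i), PySem.Str.slice part (some (i + 1)) none)

def pvB_step (d : PySem.Dict String String) (part : String) : PySem.Dict String String :=
  match pvB_kv? part with
  | some (k, v) => d.insert k v
  | none => d

-- [int(t.strip()) for t in v.split(",") if t.strip().isdigit()]
def pvB_days (v : String) : List Int :=
  ((PySem.Str.split? v ",").getD []).filterMap
    (fun t => if PySem.Str.strIsdigit (PySem.Str.strip t)
              then some ((PySem.Int.ofStr? (PySem.Str.strip t)).getD 0) else none)

def parse_sprinkler_schedule_alt (schedule : String) : List Int × Option String :=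
  let mapping := ((PySem.Str.split? schedule ";").getD []).foldl pvB_step PySem.Dict.empty
  let days := match mapping.get? "days" with
    | some v => pvB_days v
    | none => []
  let time_str := (mapping.get? "time").map (fun v => PySem.Str.strip v)
  (days, time_str)

-- ===== PRECONDITION & SPEC =====
-- Pre_ excludes malformed parts in which the literal "days:"/"time:" reappears after the prefix
-- (e.g. "days:1,days:2"): there A's replace-all deletes the interior occurrences while B reads the
-- text after the first colon — the input is garbage and neither reading is specified.
def Pre_parse_sprinkler_schedule (schedule : String) : Prop :=
  ∀ p ∈ (PySem.Str.split? schedule ";").getD [],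
    (PySem.Str.startswith p "days:" = true →
       PySem.Str.isIn "days:" (PySem.Str.slice p (some 5) none) = false) ∧
    (PySem.Str.startswith p "time:" = true →
       PySem.Str.isIn "time:" (PySem.Str.slice p (some 5) none) = false)
instance (schedule : String) : Decidable (Pre_parse_sprinkler_schedule schedule) := by unfold Pre_parse_sprinkler_schedule; infer_instance

def pvWitness_parse_sprinkler_schedule : String := "days:1, 3;time:06:00"

def Spec_parse_sprinkler_schedule (schedule : String) (out : List Int × Option String) : Prop := out = parse_sprinkler_schedule_alt schedule
instance (schedule : String) (out : List Int × Option String) : Decidable (Spec_parse_sprinkler_schedule schedule out) := by unfold Spec_parse_sprinkler_schedule; infer_instance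

-- ===== CLAIM (what is proved, stated in full; the proofs are below) =====
def Claim_equal_parse_sprinkler_schedule : Prop := ∀ (schedule : String), Dom_parse_sprinkler_schedule schedule → Pre_parse_sprinkler_schedule schedule → Spec_parse_sprinkler_schedule schedule (parse_sprinkler_schedule schedule)

-- ===== LEMMAS AND PROOFS =====

-- the two key prefixes are mutually exclusive
theorem pv_not_both (l : List Char)
    (h : PySem.Chars.startswith l ['d','a','y','s',':'] = true) :
    PySem.Chars.startswith l ['t','i','m','e',':'] = false := by
  rw [PySem.Chars.startswith_iff] at h
  obtain ⟨t, ht⟩ := h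
  by_contra hc
  rw [Bool.not_eq_false, PySem.Chars.startswith_iff] at hc
  obtain ⟨u, hu⟩ := hc
  rw [← ht] at hu
  simp at hu

-- A's fold = last matching part per key
theorem pvA_fold_char (parts : List String) (st : List Int × Option String) :
    parts.foldl pvA_step st =
      ((match parts.reverse.find? (fun p => PySem.Str.startswith p "days:") with
        | none => st.1
        | some p => pvA_daysOf p),
       (match parts.reverse.find? (fun p => PySem.Str.startswith p "time:") with
        | none => st.2
        | some p => some (pvA_timeOf p))) := by
  induction parts generalizing st with
  | nil => simp
  | cons p rest ih =>
    simp only [List.foldl_cons, List.reverse_cons, List.find?_append]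
    rw [ih]
    cases hd : rest.reverse.find? (fun p => PySem.Str.startswith p "days:") <;>
      cases ht : rest.reverse.find? (fun p => PySem.Str.startswith p "time:") <;>
        simp [pvA_step] <;> split_ifs <;> simp_all [pv_not_both]

-- B's dict lookup after the fold = value of the last part whose key is k
theorem pvB_get?_foldl (parts : List String) (d : PySem.Dict String String) (k : String) :
    (parts.foldl pvB_step d).get? k =
      match parts.reverse.find? (fun p => decide ((pvB_kv? p).map Prod.fst = some k)) with
      | some p => (pvB_kv? p).map Prod.snd
      | none => d.get? k := by
  induction parts generalizing d with
  | nil => simp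
  | cons p rest ih =>
    simp only [List.foldl_cons, List.reverse_cons, List.find?_append]
    rw [ih]
    cases hf : rest.reverse.find? (fun p => decide ((pvB_kv? p).map Prod.fst = some k)) with
    | some q => simp
    | none =>
      simp only []
      unfold pvB_step
      cases hkv : pvB_kv? p with
      | none => simp [hkv]
      | some kv =>
        rw [PySem.Dict.get?_insert]
        by_cases hk : k = kv.1
        · simp [hkv, hk]
        · have hne : kv.1 ≠ k := fun h2 => hk h2.symm
          simp [hkv, hk, hne]

-- [a] <+: l ↔ l[0]? = some a, shifted by drop
theorem pv_singleton_prefix_drop (a : Char) (l : List Char) (n : Nat) :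
    [a] <+: l.drop n ↔ l[n]? = some a := by
  rw [← List.head?_drop]
  constructor
  · rintro ⟨t, ht⟩; rw [← ht]; rfl
  · intro h
    cases hl : l.drop n with
    | nil => rw [hl] at h; simp at h
    | cons x t => rw [hl] at h; simp at h; exact ⟨t, by simp [h]⟩

-- first colon of a "key:"-prefixed string sits right after key
theorem pv_find_colon (key cs : List Char) (hk : (':' : Char) ∉ key)
    (h : (key ++ [':']) <+: cs) : PySem.Chars.find cs [':'] = (key.length : Int) := by
  obtain ⟨t, ht⟩ := h
  have hcs : cs = key ++ ':' :: t := by rw [← ht]; simp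
  have hcol : [(':' : Char)] <+: cs.drop key.length := by
    rw [hcs, List.drop_left' rfl]; exact ⟨t, rfl⟩
  have hinf : [(':' : Char)] <:+: cs :=
    hcol.isInfix.trans (cs.drop_suffix key.length).isInfix
  have hnn : 0 ≤ PySem.Chars.find cs [':'] := (PySem.Chars.find_nonneg_iff cs [':']).mpr hinf
  obtain ⟨hpre2, hmin⟩ := PySem.Chars.find_spec hnn
  have h1 : (PySem.Chars.find cs [':']).toNat = key.length := by
    generalize hgen : (PySem.Chars.find cs [':']).toNat = n at hpre2 hmin
    rcases Nat.lt_trichotomy n key.length with hlt | heq | hgt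
    · exfalso
      have hg := (pv_singleton_prefix_drop ':' cs n).mp hpre2
      rw [hcs, List.getElem?_append_left hlt, List.getElem?_eq_getElem hlt] at hg
      exact hk ((Option.some_inj.mp hg) ▸ List.getElem_mem hlt)
    · exact heq
    · exact absurd hcol (hmin key.length hgt)
  omega

-- kv? of a part that starts with "key:" (':' not in key)
theorem pvB_kv?_of_startswith (p : String) (key : List Char) (hk : (':' : Char) ∉ key)
    (h : (key ++ [':']) <+: p.toList) :
    pvB_kv? p = some (String.ofList key, String.ofList (p.toList.drop (key.length + 1))) := by
  have hfind : PySem.Str.find p ":" = (key.length : Int) := by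
    simpa using pv_find_colon key p.toList hk h
  unfold pvB_kv?
  rw [hfind]
  rw [if_neg (by omega)]
  obtain ⟨t, ht⟩ := h
  have hcs : p.toList = key ++ ':' :: t := by rw [← ht]; simp
  refine congrArg some (Prod.ext ?_ ?_)
  · apply String.toList_inj.mp
    simp only [PySem.Str.toList_slice, PySem.Chars.slice_eq_listSlice,
      PySem.List.slice_to_natCast, String.toList_ofList]
    rw [hcs, List.take_left' rfl]
  · apply String.toList_inj.mp
    have hcast : (key.length : Int) + 1 = ((key.length + 1 : Nat) : Int) := by push_cast; ring
    simp only [PySem.Str.toList_slice, PySem.Chars.slice_eq_listSlice, hcast,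
      PySem.List.slice_from_natCast, String.toList_ofList]

-- the key of kv? is "key" exactly when the part starts with "key:"
theorem pvB_kv?_fst_iff (p : String) (key : List Char) (hk : (':' : Char) ∉ key) :
    ((pvB_kv? p).map Prod.fst = some (String.ofList key)) ↔ (key ++ [':']) <+: p.toList := by
  constructor
  · intro hfst
    unfold pvB_kv? at hfst
    by_cases hneg : PySem.Str.find p ":" = -1
    · rw [if_pos hneg] at hfst; simp at hfst
    · rw [if_neg hneg] at hfst
      simp only [Option.map_some, Option.some_inj] at hfst
      have hstr : PySem.Str.find p ":" = PySem.Chars.find p.toList [':'] := by simp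
      have hnn : 0 ≤ PySem.Chars.find p.toList [':'] := by
        have := PySem.Chars.neg_one_le_find p.toList [':']
        have hne : PySem.Chars.find p.toList [':'] ≠ -1 := by
          intro hcon; apply hneg; simpa using hcon
        omega
      obtain ⟨hpre2, _⟩ := PySem.Chars.find_spec hnn
      obtain ⟨r, hr⟩ := hpre2
      have hkey : p.toList.take (PySem.Chars.find p.toList [':']).toNat = key := by
        have h4 := congrArg String.toList hfst
        rw [hstr, PySem.Str.toList_slice, PySem.Chars.slice_eq_listSlice,
          PySem.List.slice_to _ hnn, String.toList_ofList] at h4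
        exact h4
      refine ⟨r, ?_⟩
      calc key ++ [':'] ++ r = key ++ ([':'] ++ r) := by simp
        _ = p.toList.take (PySem.Chars.find p.toList [':']).toNat ++
              p.toList.drop (PySem.Chars.find p.toList [':']).toNat := by rw [hkey, hr]
        _ = p.toList := List.take_append_drop _ _
  · intro h
    rw [pvB_kv?_of_startswith p key hk h]
    rfl

-- replace deletes nothing when the pattern does not occur
theorem pv_replace_go_id (old l acc : List Char) (fuel : Nat) (h : ¬ old <:+: l) :
    PySem.Chars.replace.go old [] fuel l acc = acc.reverse ++ l := by
  induction l generalizing fuel acc with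
  | nil => cases fuel <;> simp [PySem.Chars.replace.go]
  | cons c t ih =>
    cases fuel with
    | zero => simp [PySem.Chars.replace.go]
    | succ fuel =>
      have hnp : old.isPrefixOf (c :: t) = false := by
        rw [Bool.eq_false_iff]
        intro hp
        exact h (List.IsPrefix.isInfix (List.isPrefixOf_iff_prefix.mp hp))
      have hnt : ¬ old <:+: t := fun hi => h (hi.trans (List.suffix_cons c t).isInfix)
      rw [PySem.Chars.replace.go, hnp]
      simp only [Bool.false_eq_true, if_false]
      rw [ih (c :: acc) fuel hnt]
      simp

-- replace of "key:..." with no further occurrence strips just the prefix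
theorem pv_replace_strip (old cs : List Char) (hold : old ≠ [])
    (hpre : old <+: cs) (hrest : ¬ old <:+: cs.drop old.length) :
    PySem.Chars.replace cs old [] = cs.drop old.length := by
  unfold PySem.Chars.replace
  rw [if_neg (by simpa using hold)]
  cases cs with
  | nil =>
    obtain ⟨t, ht⟩ := hpre
    cases old <;> simp_all
  | cons c t =>
    have hp : old.isPrefixOf (c :: t) = true := List.isPrefixOf_iff_prefix.mpr hpre
    rw [List.length_cons, PySem.Chars.replace.go, hp]
    simp only [if_true]
    rw [pv_replace_go_id old _ _ _ hrest]
    simp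

-- B's comprehension = A's filter+map
theorem pvB_days_eq (v : String) : pvB_days v =
    (((PySem.Str.split? v ",").getD []).filter
        (fun d => PySem.Str.strIsdigit (PySem.Str.strip d))).map
      (fun d => (PySem.Int.ofStr? (PySem.Str.strip d)).getD 0) := by
  unfold pvB_days
  induction (PySem.Str.split? v ",").getD [] with
  | nil => rfl
  | cons d rest ih =>
    by_cases h : PySem.Chars.strIsdigit (PySem.Chars.strip d.toList) = true <;>
      simp [h] <;> simpa using ih

theorem pv_pred_eq (key : List Char) (lit colon : String) (hk : (':' : Char) ∉ key)
    (hofs : String.ofList key = lit) (hlit : colon.toList = key ++ [':']) :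
    (fun p => decide ((pvB_kv? p).map Prod.fst = some lit)) =
      (fun p => PySem.Str.startswith p colon) := by
  funext p
  have hiff := pvB_kv?_fst_iff p key hk
  rw [hofs] at hiff
  rw [Bool.eq_iff_iff, decide_eq_true_iff, hiff,
    show PySem.Str.startswith p colon = PySem.Chars.startswith p.toList colon.toList from by simp,
    hlit, PySem.Chars.startswith_iff]

-- under Pre_'s no-reoccurrence condition, A's replace-all strips exactly the 5-char prefix
theorem pv_replace_of_pre (p : String) (key : List Char) (colon : String)
    (hk5 : key.length = 4) (hlit : colon.toList = key ++ [':'])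
    (hsw : PySem.Str.startswith p colon = true)
    (hno : PySem.Str.isIn colon (PySem.Str.slice p (some 5) none) = false) :
    PySem.Str.replace p colon "" = String.ofList (p.toList.drop 5) := by
  have hpre : (key ++ [':']) <+: p.toList := by
    rw [← hlit]
    exact (PySem.Chars.startswith_iff _ _).mp (by simpa using hsw)
  have hlen : (key ++ [':']).length = 5 := by simp [hk5]
  have hno' : ¬ (key ++ [':']) <:+: p.toList.drop 5 := by
    have h3 : PySem.Chars.isIn colon.toList (PySem.Str.slice p (some 5) none).toList = false := by
      simpa using hno
    rw [hlit, PySem.Str.toList_slice, PySem.Chars.slice_eq_listSlice,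
      PySem.List.slice_from _ (by omega : (0:Int) ≤ 5),
      show ((5:Int)).toNat = 5 from rfl, PySem.Chars.isIn_eq_false_iff] at h3
    exact h3
  apply String.toList_inj.mp
  rw [PySem.Str.toList_replace, hlit, show ("" : String).toList = [] from rfl]
  rw [pv_replace_strip (key ++ [':']) p.toList (by simp) hpre (by rw [hlen]; exact hno')]
  rw [hlen]
  simp

theorem parse_sprinkler_schedule_spec' (schedule : String)
    (hpre : Pre_parse_sprinkler_schedule schedule) :
    parse_sprinkler_schedule schedule = parse_sprinkler_schedule_alt schedule := by
  unfold parse_sprinkler_schedule parse_sprinkler_schedule_alt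
  by_cases h0 : schedule = ""
  · subst h0; decide
  · rw [if_neg h0, pvA_fold_char]
    simp only [pvB_get?_foldl, PySem.Dict.get?_empty]
    rw [pv_pred_eq ['d','a','y','s'] "days" "days:" (by decide) rfl (by decide),
        pv_pred_eq ['t','i','m','e'] "time" "time:" (by decide) rfl (by decide)]
    rw [Prod.mk.injEq]
    constructor
    · cases hd : ((PySem.Str.split? schedule ";").getD []).reverse.find?
          (fun p => PySem.Str.startswith p "days:") with
      | none => rfl
      | some q =>
        have hsw : PySem.Str.startswith q "days:" = true := by
          simpa using List.find?_some hd
        have hmem : q ∈ (PySem.Str.split? schedule ";").getD [] :=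
          List.mem_reverse.mp (List.mem_of_find?_eq_some hd)
        have hprefix : (['d','a','y','s'] ++ [':']) <+: q.toList :=
          (PySem.Chars.startswith_iff _ _).mp (by simpa using hsw)
        have hkv : pvB_kv? q =
            some (String.ofList ['d','a','y','s'], String.ofList (q.toList.drop 5)) := by
          simpa using pvB_kv?_of_startswith q ['d','a','y','s'] (by decide) hprefix
        simp only [hkv, Option.map_some]
        rw [pvB_days_eq]
        unfold pvA_daysOf
        rw [pv_replace_of_pre q ['d','a','y','s'] "days:" rfl (by decide) hsw
          ((hpre q hmem).1 hsw)]
    · cases ht : ((PySem.Str.split? schedule ";").getD []).reverse.find?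
          (fun p => PySem.Str.startswith p "time:") with
      | none => rfl
      | some q =>
        have hsw : PySem.Str.startswith q "time:" = true := by
          simpa using List.find?_some ht
        have hmem : q ∈ (PySem.Str.split? schedule ";").getD [] :=
          List.mem_reverse.mp (List.mem_of_find?_eq_some ht)
        have hprefix : (['t','i','m','e'] ++ [':']) <+: q.toList :=
          (PySem.Chars.startswith_iff _ _).mp (by simpa using hsw)
        have hkv : pvB_kv? q =
            some (String.ofList ['t','i','m','e'], String.ofList (q.toList.drop 5)) := by
          simpa using pvB_kv?_of_startswith q ['t','i','m','e'] (by decide) hprefix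
        simp only [hkv, Option.map_some]
        unfold pvA_timeOf
        rw [pv_replace_of_pre q ['t','i','m','e'] "time:" rfl (by decide) hsw
          ((hpre q hmem).2 hsw)]

-- ===== VERDICT (by name: the statement is the Claim_ definition above) =====
theorem parse_sprinkler_schedule_spec : Claim_equal_parse_sprinkler_schedule := by
  intro schedule _ hpre
  exact parse_sprinkler_schedule_spec' schedule hpre
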